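-- pv_equiv track=rewrite | github.com/ppizarror/PyDetex | pydetex/_utils_tex.py | _apply_modifier
-- ===== SOURCE A (Python) =====
-- from typing import Tuple, Union, List, Dict, Optional, Any
--
-- def _apply_modifier(s: str, modifier: str, d: Dict[Any, str]) -> str:
--     """
--     This will search for the ^ signs and replace the next
--     digit or (digits when {} is used) with its/their uppercase representation.
--
--     :param s: Latex string code
--     :param modifier: Modifier command
--     :param d: Dict to look upon
--     :return: New text with replaced text.
--     """
--     s = s.replace(modifier, "^")
--     newtext = ""
--     mode_normal, mode_modified, mode_long = range(3)
--     mode = mode_normal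
--     for ch in s:
--         if mode == mode_normal and ch == '^':
--             mode = mode_modified
--             continue
--         elif mode == mode_modified and ch == '{':
--             mode = mode_long
--             continue
--         elif mode == mode_modified:
--             newtext += d.get(ch, ch)
--             mode = mode_normal
--             continue
--         elif mode == mode_long and ch == '}':
--             mode = mode_normal
--             continue
--
--         if mode == mode_normal:
--             newtext += ch
--         else:
--             newtext += d.get(ch, ch)
--     return newtext
-- ===== SOURCE B (Python) =====
-- import re
--
-- def _apply_modifier(s: str, modifier: str, d) -> str:
--     s = s.replace(modifier, "^")
--
--     def repl(m):
--         g1, g2 = m.group(1), m.group(2)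
--         if g1 is not None:
--             return ''.join(d.get(c, c) for c in g1)
--         if g2 is not None:
--             return d.get(g2, g2)
--         return ''
--
--     return re.sub(r'\^(?:\{([^}]*)\}?|(.))?', repl, s, flags=re.DOTALL)
-- ===== Notes on version B (the rewrite author's own statement) =====
-- stated objective: idiomatic
-- what changed: Replaces A's hand-rolled three-state (normal/modified/long) per-character mode machine with a single regex substitution: re.sub with a DOTALL pattern matching '^' followed by an optional '{...}' group (closing brace optional) or a single character, and a replacement callback that translates the captured characters through the dict.
import Mathlib
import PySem

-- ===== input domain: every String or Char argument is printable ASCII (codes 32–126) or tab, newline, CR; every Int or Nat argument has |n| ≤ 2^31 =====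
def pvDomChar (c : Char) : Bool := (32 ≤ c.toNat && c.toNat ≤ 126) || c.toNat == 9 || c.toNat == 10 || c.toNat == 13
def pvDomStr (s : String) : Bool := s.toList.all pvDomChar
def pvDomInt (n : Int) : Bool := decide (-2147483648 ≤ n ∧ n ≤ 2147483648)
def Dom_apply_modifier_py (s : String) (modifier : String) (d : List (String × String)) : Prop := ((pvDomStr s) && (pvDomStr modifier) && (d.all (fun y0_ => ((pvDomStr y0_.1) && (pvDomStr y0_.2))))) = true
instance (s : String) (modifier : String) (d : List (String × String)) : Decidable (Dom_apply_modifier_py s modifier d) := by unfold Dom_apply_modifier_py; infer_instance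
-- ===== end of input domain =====

-- B replaces A's three-state character-by-character mode machine with one regex substitution
-- (re.sub r'\^(?:\{([^}]*)\}?|(.))?' with a replacement callback); objective: idiomatic.

-- d.get(ch, ch) for a one-character string ch (used by both Pythons)
def pvGet (d : List (String × String)) (c : Char) : List Char :=
  (PySem.Dict.getD ⟨d⟩ (String.ofList [c]) (String.ofList [c])).toList

-- ===== PORT A =====
-- the body of A's for-loop: Python's branch chain over (newtext, mode), in order
def pvStepA (d : List (String × String)) (st : List Char × Nat) (ch : Char) : List Char × Nat :=
  if st.2 = 0 ∧ ch = '^' then (st.1, 1)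
  else if st.2 = 1 ∧ ch = '{' then (st.1, 2)
  else if st.2 = 1 then (st.1 ++ pvGet d ch, 0)
  else if st.2 = 2 ∧ ch = '}' then (st.1, 0)
  else if st.2 = 0 then (st.1 ++ [ch], st.2)
  else (st.1 ++ pvGet d ch, st.2)

def apply_modifier_py (s : String) (modifier : String) (d : List (String × String)) : String :=
  String.ofList (((PySem.Str.replace s modifier "^").toList.foldl (pvStepA d) ([], 0)).1)

-- ===== PORT B =====
-- hand port of re.sub(r'\^(?:\{([^}]*)\}?|(.))?', repl, s, DOTALL): scan for the next '^'
-- (every other char is copied), then match the optional group: '{' + chars up to an OPTIONAL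
-- '}' → translate them all; else one char (any char, DOTALL) → translate it; else (end of
-- string) the bare '^' matches alone and repl returns ''. Exact for this pattern: its matches
-- always start at a literal '^'.
def pvSub (d : List (String × String)) : List Char → List Char
  | [] => []
  | c :: rest =>
    if c = '^' then
      match rest with
      | [] => []
      | c2 :: r2 =>
        if c2 = '{' then
          (r2.takeWhile (· ≠ '}')).flatMap (pvGet d)
            ++ pvSub d ((r2.dropWhile (· ≠ '}')).drop 1)
        else pvGet d c2 ++ pvSub d r2
    else c :: pvSub d rest
termination_by cs => cs.length
decreasing_by
  · have := List.length_dropWhile_le (fun c => decide (c ≠ '}')) r2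
    simp only [List.length_drop, List.length_cons]
    omega
  · simp
  · simp

def apply_modifier_py_alt (s : String) (modifier : String) (d : List (String × String)) : String :=
  String.ofList (pvSub d (PySem.Str.replace s modifier "^").toList)

-- ===== PRECONDITION & SPEC =====
def Spec_apply_modifier_py (s : String) (modifier : String) (d : List (String × String)) (out : String) : Prop := out = apply_modifier_py_alt s modifier d
instance (s : String) (modifier : String) (d : List (String × String)) (out : String) : Decidable (Spec_apply_modifier_py s modifier d out) := by unfold Spec_apply_modifier_py; infer_instance

-- ===== CLAIM (what is proved, stated in full; the proofs are below) =====
def Claim_equal_apply_modifier_py : Prop := ∀ (s : String) (modifier : String) (d : List (String × String)), Dom_apply_modifier_py s modifier d → Spec_apply_modifier_py s modifier d (apply_modifier_py s modifier d)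

-- ===== LEMMAS AND PROOFS =====

-- what A's loop computes from mode_long: translate until '}', then back to normal
def pvL (d : List (String × String)) : List Char → List Char
  | [] => []
  | c :: r => if c = '}' then pvSub d r else pvGet d c ++ pvL d r

-- what A's loop computes from mode_modified
def pvM (d : List (String × String)) : List Char → List Char
  | [] => []
  | c :: r => if c = '{' then pvL d r else pvGet d c ++ pvSub d r

lemma pvL_eq (d : List (String × String)) : ∀ cs : List Char,
    pvL d cs = (cs.takeWhile (· ≠ '}')).flatMap (pvGet d)
      ++ pvSub d ((cs.dropWhile (· ≠ '}')).drop 1) := by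
  intro cs
  induction cs with
  | nil => simp [pvL, pvSub]
  | cons c r ih =>
    by_cases h : c = '}'
    · simp [pvL, h]
    · simp [pvL, h, ih]

lemma pvSub_cons_ne (d : List (String × String)) (c : Char) (rest : List Char)
    (h : ¬ c = '^') : pvSub d (c :: rest) = c :: pvSub d rest := by
  rw [pvSub.eq_def]; simp [h]

lemma pvSub_caret (d : List (String × String)) (rest : List Char) :
    pvSub d ('^' :: rest) = pvM d rest := by
  cases rest with
  | nil => simp [pvSub, pvM]
  | cons c2 r2 =>
    by_cases h : c2 = '{'
    · subst h; simp [pvSub, pvM, pvL_eq]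
    · simp [pvSub, pvM, h]

lemma foldA_eq (d : List (String × String)) : ∀ (cs : List Char) (acc : List Char),
    ((cs.foldl (pvStepA d) (acc, 0)).1 = acc ++ pvSub d cs)
    ∧ ((cs.foldl (pvStepA d) (acc, 1)).1 = acc ++ pvM d cs)
    ∧ ((cs.foldl (pvStepA d) (acc, 2)).1 = acc ++ pvL d cs) := by
  intro cs
  induction cs with
  | nil => intro acc; simp [pvSub, pvM, pvL]
  | cons c r ih =>
    intro acc
    refine ⟨?_, ?_, ?_⟩
    · by_cases h : c = '^'
      · subst h
        have hstep : pvStepA d (acc, 0) '^' = (acc, 1) := by simp [pvStepA]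
        rw [List.foldl_cons, hstep, pvSub_caret]
        exact (ih acc).2.1
      · have hstep : pvStepA d (acc, 0) c = (acc ++ [c], 0) := by simp [pvStepA, h]
        rw [List.foldl_cons, hstep, (ih (acc ++ [c])).1, pvSub_cons_ne d c r h,
          List.append_assoc]
        rfl
    · by_cases h : c = '{'
      · subst h
        have hstep : pvStepA d (acc, 1) '{' = (acc, 2) := by simp [pvStepA]
        rw [List.foldl_cons, hstep, (ih acc).2.2]
        simp [pvM]
      · have hstep : pvStepA d (acc, 1) c = (acc ++ pvGet d c, 0) := by simp [pvStepA, h]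
        rw [List.foldl_cons, hstep, (ih (acc ++ pvGet d c)).1]
        simp [pvM, h]
    · by_cases h : c = '}'
      · subst h
        have hstep : pvStepA d (acc, 2) '}' = (acc, 0) := by simp [pvStepA]
        rw [List.foldl_cons, hstep, (ih acc).1]
        simp [pvL]
      · have hstep : pvStepA d (acc, 2) c = (acc ++ pvGet d c, 2) := by simp [pvStepA, h]
        rw [List.foldl_cons, hstep, (ih (acc ++ pvGet d c)).2.2]
        simp [pvL, h]

-- ===== VERDICT (by name: the statement is the Claim_ definition above) =====
theorem apply_modifier_py_spec : Claim_equal_apply_modifier_py := by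
  intro s modifier d _
  unfold Spec_apply_modifier_py apply_modifier_py apply_modifier_py_alt
  have h := (foldA_eq d (PySem.Str.replace s modifier "^").toList []).1
  simp only [List.nil_append] at h
  rw [h]
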